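-- pv_equiv track=rewrite | github.com/XJS924/model_hub | nlp/ner_test/ner_util.py | cat_list_py
-- ===== SOURCE A (Python) =====
-- def cat_list_py(list_py):
--     result = []
--     count = 0
--     ss =''
--     def func(list_py, count, result, ss):
--         cur_list= list_py[count]
--         for cur in cur_list:
--             if count+1  < len(list_py):
--                 func(list_py, count+1 , result , ss + " " + cur)
--             else:
--                 result.append(ss + " " + cur)
--     func(list_py, count, result, ss)
--     return [r.strip() for r in result]
-- ===== SOURCE B (Python) =====
-- import itertools
--
-- def cat_list_py(list_py):
--     return [" ".join(combo).strip() for combo in itertools.product(*list_py)]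
-- ===== Notes on version B (the rewrite author's own statement) =====
-- stated objective: idiomatic
-- what changed: Replaced the hand-written recursion with a string accumulator by a single comprehension over itertools.product with ' '.join().strip().
-- outside the precondition, e.g. on cat_list_py([]): A raises IndexError, B returns ['']
import Mathlib
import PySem

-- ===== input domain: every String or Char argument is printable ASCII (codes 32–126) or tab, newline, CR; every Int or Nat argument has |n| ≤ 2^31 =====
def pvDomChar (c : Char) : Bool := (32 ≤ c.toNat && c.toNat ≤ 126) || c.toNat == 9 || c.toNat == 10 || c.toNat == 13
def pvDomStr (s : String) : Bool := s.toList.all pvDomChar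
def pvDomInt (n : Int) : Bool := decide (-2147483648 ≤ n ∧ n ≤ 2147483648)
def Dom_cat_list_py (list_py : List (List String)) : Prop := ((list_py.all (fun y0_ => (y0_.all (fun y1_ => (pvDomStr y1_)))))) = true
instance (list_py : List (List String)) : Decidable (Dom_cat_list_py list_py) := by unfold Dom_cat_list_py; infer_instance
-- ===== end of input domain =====

-- B replaces A's hand-written recursion with a string accumulator by the idiomatic
-- "join over the cartesian product" comprehension (objective: idiomatic; no speed claim).

-- ===== PORT A =====
-- inner recursive 'func': iterates over cur_list (= list_py[count]),
-- recursing with count+1 while count+1 < len(list_py), else appending to result.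
def catFunc (list_py : List (List String)) (count : Nat) (ss : String)
    (cur_list : List String) (result : List String) : List String :=
  match cur_list with
  | [] => result
  | cur :: rest =>
    let result' :=
      if _h : count + 1 < list_py.length then
        catFunc list_py (count + 1) (ss ++ " " ++ cur) (list_py.getD (count + 1) []) result
      else
        result ++ [ss ++ " " ++ cur]
    catFunc list_py count ss rest result'
termination_by (list_py.length - count, cur_list.length)
decreasing_by
  · apply Prod.Lex.left; omega
  · apply Prod.Lex.right; simp

def cat_list_py (list_py : List (List String)) : List String :=
  let result : List String := []
  let count : Nat := 0
  let ss : String := ""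
  -- list_py[count] raises IndexError for empty list_py (excluded by Pre_); getD is exact inside Pre_
  let result := catFunc list_py count ss (list_py.getD count []) result
  result.map (fun r => PySem.Str.strip r)

-- ===== PORT B =====
-- itertools.product(*list_py), first factor varying slowest
def pyProduct (ls : List (List String)) : List (List String) :=
  match ls with
  | [] => [[]]
  | l :: rest => l.flatMap (fun x => (pyProduct rest).map (fun combo => x :: combo))

def cat_list_py_alt (list_py : List (List String)) : List String :=
  (pyProduct list_py).map (fun combo => PySem.Str.strip (PySem.Str.join " " combo))

-- ===== PRECONDITION & SPEC =====
-- Pre_ excludes only the empty list_py, on which A raises IndexError (list_py[0]).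
def Pre_cat_list_py (list_py : List (List String)) : Prop := list_py ≠ []
instance (list_py : List (List String)) : Decidable (Pre_cat_list_py list_py) := by
  unfold Pre_cat_list_py; infer_instance
def pvWitness_cat_list_py : List (List String) := [["a"], ["b", "c"]]

def Spec_cat_list_py (list_py : List (List String)) (out : List String) : Prop := out = cat_list_py_alt list_py
instance (list_py : List (List String)) (out : List String) : Decidable (Spec_cat_list_py list_py out) := by unfold Spec_cat_list_py; infer_instance

-- ===== CLAIM (what is proved, stated in full; the proofs are below) =====
def Claim_equal_cat_list_py : Prop := ∀ (list_py : List (List String)), Dom_cat_list_py list_py → Pre_cat_list_py list_py → Spec_cat_list_py list_py (cat_list_py list_py)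

-- ===== LEMMAS AND PROOFS =====

-- the string accumulator step A uses, and its List Char image
def catStep (a c : String) : String := a ++ " " ++ c
def catStepL (a c : List Char) : List Char := a ++ [' '] ++ c

theorem toList_foldl_catStep (l : List String) (s : String) :
    (l.foldl catStep s).toList = (l.map String.toList).foldl catStepL s.toList := by
  induction l generalizing s with
  | nil => simp
  | cons c cs ih => simp [catStep, catStepL, ih]

theorem intercalate_cons_cons (sep a b : List Char) (l : List (List Char)) :
    List.intercalate sep (a :: b :: l) = a ++ sep ++ List.intercalate sep (b :: l) := by
  simp [List.intercalate, List.intersperse_cons₂, List.append_assoc]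

theorem intercalate_head_append (sep a b : List Char) (l : List (List Char)) :
    List.intercalate sep ((a ++ sep ++ b) :: l) = a ++ sep ++ List.intercalate sep (b :: l) := by
  cases l with
  | nil => simp [List.intercalate]
  | cons c cs => simp [List.intercalate, List.intersperse_cons₂, List.append_assoc]

theorem foldl_catStepL_space (cs : List (List Char)) (x : List Char) :
    cs.foldl catStepL ([' '] ++ x) = [' '] ++ List.intercalate [' '] (x :: cs) := by
  induction cs generalizing x with
  | nil => simp [List.intercalate]
  | cons c cs ih =>
    have h1 : catStepL ([' '] ++ x) c = [' '] ++ (x ++ [' '] ++ c) := by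
      simp [catStepL]
    rw [List.foldl_cons, h1, ih, intercalate_head_append, intercalate_cons_cons]

theorem strip_space_cons (l : List Char) :
    PySem.Chars.strip (' ' :: l) = PySem.Chars.strip l := by
  simp [PySem.Chars.strip, PySem.Chars.lstrip,
    show PySem.Chars.isspace ' ' = true from rfl]

-- the inner flatMap collapse used in the recursive branch
theorem flatMap_getD_eq (list_py : List (List String)) (count : Nat)
    (h : count + 1 < list_py.length) (s : String) :
    (list_py.getD (count + 1) []).flatMap (fun cur' =>
        (pyProduct (list_py.drop (count + 2))).map
          (fun combo => combo.foldl catStep (s ++ " " ++ cur'))) =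
      (pyProduct (list_py.drop (count + 1))).map (fun combo => combo.foldl catStep s) := by
  have hdrop : list_py.drop (count + 1) =
      list_py.getD (count + 1) [] :: list_py.drop (count + 2) := by
    rw [List.getD_eq_getElem list_py [] h]
    exact List.drop_eq_getElem_cons h
  rw [hdrop]
  simp only [pyProduct, List.map_flatMap, List.map_map]
  apply List.flatMap_congr
  intro cur' _
  apply List.map_congr_left
  intro combo _
  simp [catStep]

-- characterisation of A's inner recursion (fuel n bounds list_py.length - count)
theorem catFunc_eq (list_py : List (List String)) (n : Nat) :
    ∀ (count : Nat), list_py.length - count ≤ n →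
    ∀ (cur_list : List String) (ss : String) (result : List String),
    catFunc list_py count ss cur_list result =
      result ++ cur_list.flatMap (fun cur =>
        (pyProduct (list_py.drop (count + 1))).map
          (fun combo => combo.foldl catStep (ss ++ " " ++ cur))) := by
  induction n with
  | zero =>
    intro count hle cur_list ss
    induction cur_list with
    | nil => intro result; simp [catFunc]
    | cons cur rest ih =>
      intro result
      rw [catFunc]
      have h : ¬ (count + 1 < list_py.length) := by omega
      rw [dif_neg h, ih]
      have hdrop : list_py.drop (count + 1) = [] := List.drop_eq_nil_of_le (by omega)
      rw [hdrop]
      simp [pyProduct]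
  | succ n ihn =>
    intro count hle cur_list ss
    induction cur_list with
    | nil => intro result; simp [catFunc]
    | cons cur rest ih =>
      intro result
      rw [catFunc]
      by_cases h : count + 1 < list_py.length
      · rw [dif_pos h, ihn (count + 1) (by omega), ih]
        rw [List.flatMap_cons, ← List.append_assoc]
        congr 2
        have := flatMap_getD_eq list_py count h (ss ++ " " ++ cur)
        simpa [catStep] using this
      · rw [dif_neg h, ih]
        have hdrop : list_py.drop (count + 1) = [] := List.drop_eq_nil_of_le (by omega)
        rw [hdrop]
        simp [pyProduct]

theorem strip_foldl_eq_strip_join (cur : String) (combo : List String) :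
    PySem.Str.strip (combo.foldl catStep ("" ++ " " ++ cur)) =
      PySem.Str.strip (PySem.Str.join " " (cur :: combo)) := by
  have h0 : ("" ++ " " ++ cur).toList = [' '] ++ cur.toList := by simp
  have hL : (combo.foldl catStep ("" ++ " " ++ cur)).toList =
      [' '] ++ List.intercalate [' '] (cur.toList :: combo.map String.toList) := by
    rw [toList_foldl_catStep, h0, foldl_catStepL_space]
  unfold PySem.Str.strip
  rw [hL]
  have hj : (PySem.Str.join " " (cur :: combo)).toList =
      List.intercalate [' '] (cur.toList :: combo.map String.toList) := by
    simp [PySem.Str.join, PySem.Chars.join]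
  rw [hj, List.singleton_append, strip_space_cons]

-- ===== VERDICT (by name: the statement is the Claim_ definition above) =====
theorem cat_list_py_spec : Claim_equal_cat_list_py := by
  intro list_py _ hpre
  unfold Spec_cat_list_py
  match list_py, hpre with
  | l :: rest, _ =>
    show (catFunc (l :: rest) 0 "" ((l :: rest).getD 0 []) []).map PySem.Str.strip = _
    rw [catFunc_eq (l :: rest) (l :: rest).length 0 (by omega)]
    unfold cat_list_py_alt
    simp only [List.getD_cons_zero, List.nil_append, List.drop_succ_cons, List.drop_zero,
      pyProduct, List.map_flatMap, List.map_map]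
    apply List.flatMap_congr
    intro cur _
    apply List.map_congr_left
    intro combo _
    simpa using strip_foldl_eq_strip_join cur combo
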